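-- pv_equiv track=rewrite | github.com/isaiahriv1234/Freight_Project | Data/SLO CFS Spend Data 2024/consolidation_strategy.py | generate_implementation_plan
-- ===== SOURCE A (Python) =====
-- def generate_implementation_plan(actions):
--     """Generate phased implementation plan"""
--
--     phases = {
--         'Phase 1 (0-30 days)': [],
--         'Phase 2 (30-60 days)': [],
--         'Phase 3 (60-90 days)': []
--     }
--
--     # Distribute actions across phases based on complexity and savings
--     for i, action in enumerate(actions[:15]):  # Top 15 actions
--         if i < 5:
--             phases['Phase 1 (0-30 days)'].append(action)
--         elif i < 10:
--             phases['Phase 2 (30-60 days)'].append(action)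
--         else:
--             phases['Phase 3 (60-90 days)'].append(action)
--
--     return phases
-- ===== SOURCE B (Python) =====
-- def generate_implementation_plan(actions):
--     """Generate phased implementation plan (closed-form slicing, no loop)."""
--     return {
--         'Phase 1 (0-30 days)': actions[:5],
--         'Phase 2 (30-60 days)': actions[5:10],
--         'Phase 3 (60-90 days)': actions[10:15],
--     }
-- ===== Notes on version B (the rewrite author's own statement) =====
-- stated objective: simpler
-- what changed: Replaces the enumerate loop with per-index branching and dict appends by building the dict directly from three closed-form slices actions[:5], actions[5:10], actions[10:15].
import Mathlib
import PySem

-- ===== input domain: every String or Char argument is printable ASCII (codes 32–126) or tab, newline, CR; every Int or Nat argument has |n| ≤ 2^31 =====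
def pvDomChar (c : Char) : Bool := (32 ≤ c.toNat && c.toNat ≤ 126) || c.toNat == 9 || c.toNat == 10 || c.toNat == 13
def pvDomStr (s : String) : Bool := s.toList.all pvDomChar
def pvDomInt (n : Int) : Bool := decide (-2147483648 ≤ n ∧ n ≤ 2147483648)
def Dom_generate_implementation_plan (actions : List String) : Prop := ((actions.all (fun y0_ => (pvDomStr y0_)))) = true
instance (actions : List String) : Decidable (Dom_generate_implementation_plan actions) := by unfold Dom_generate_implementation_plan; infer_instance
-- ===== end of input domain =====

-- B replaces A's enumerate loop with per-index branching by three closed-form slices; objective: simpler.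

-- ===== PORT A =====
def generate_implementation_plan (actions : List String) : List (String × List String) :=
  let phases : PySem.Dict String (List String) :=
    ((PySem.Dict.empty.insert "Phase 1 (0-30 days)" []).insert "Phase 2 (30-60 days)" []).insert "Phase 3 (60-90 days)" []
  let phases := (PySem.List.enumerate (PySem.List.slice actions none (some 15)) 0).foldl
    (fun d (p : Int × String) =>
      if p.1 < 5 then d.modify "Phase 1 (0-30 days)" [] (· ++ [p.2])
      else if p.1 < 10 then d.modify "Phase 2 (30-60 days)" [] (· ++ [p.2])
      else d.modify "Phase 3 (60-90 days)" [] (· ++ [p.2])) phases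
  phases.items

-- ===== PORT B =====
def generate_implementation_plan_alt (actions : List String) : List (String × List String) :=
  [("Phase 1 (0-30 days)", PySem.List.slice actions none (some 5)),
   ("Phase 2 (30-60 days)", PySem.List.slice actions (some 5) (some 10)),
   ("Phase 3 (60-90 days)", PySem.List.slice actions (some 10) (some 15))]

-- ===== PRECONDITION & SPEC =====
def Spec_generate_implementation_plan (actions : List String) (out : List (String × List String)) : Prop := out = generate_implementation_plan_alt actions
instance (actions : List String) (out : List (String × List String)) : Decidable (Spec_generate_implementation_plan actions out) := by unfold Spec_generate_implementation_plan; infer_instance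

-- ===== CLAIM (what is proved, stated in full; the proofs are below) =====
def Claim_equal_generate_implementation_plan : Prop := ∀ (actions : List String), Dom_generate_implementation_plan actions → Spec_generate_implementation_plan actions (generate_implementation_plan actions)

-- ===== LEMMAS AND PROOFS =====

-- A's loop body and initial dict, named so the chunk lemmas can speak about them.
def gipStep (d : PySem.Dict String (List String)) (p : Int × String) : PySem.Dict String (List String) :=
  if p.1 < 5 then d.modify "Phase 1 (0-30 days)" [] (· ++ [p.2])
  else if p.1 < 10 then d.modify "Phase 2 (30-60 days)" [] (· ++ [p.2])
  else d.modify "Phase 3 (60-90 days)" [] (· ++ [p.2])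

theorem gip_eq (actions : List String) :
    generate_implementation_plan actions =
      ((PySem.List.enumerate (PySem.List.slice actions none (some 15)) 0).foldl gipStep
        (PySem.Dict.mk [("Phase 1 (0-30 days)", []), ("Phase 2 (30-60 days)", []), ("Phase 3 (60-90 days)", [])])).items := rfl

-- Chunk 1: indices all < 5 append to phase 1.
theorem gip_chunk1 (ys : List String) (s : Int) (l1 l2 l3 : List String)
    (h : ys = [] ∨ (0 ≤ s ∧ s + ys.length ≤ 5)) :
    (PySem.List.enumerate ys s).foldl gipStep
        (PySem.Dict.mk [("Phase 1 (0-30 days)", l1), ("Phase 2 (30-60 days)", l2), ("Phase 3 (60-90 days)", l3)]) =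
      PySem.Dict.mk [("Phase 1 (0-30 days)", l1 ++ ys), ("Phase 2 (30-60 days)", l2), ("Phase 3 (60-90 days)", l3)] := by
  induction ys generalizing s l1 with
  | nil => simp [PySem.List.enumerate_nil]
  | cons y ys ih =>
    rcases h with h | ⟨h0, hlen⟩
    · exact absurd h (by simp)
    simp only [List.length_cons] at hlen
    rw [PySem.List.enumerate_cons, List.foldl_cons,
      show gipStep (PySem.Dict.mk [("Phase 1 (0-30 days)", l1), ("Phase 2 (30-60 days)", l2), ("Phase 3 (60-90 days)", l3)]) (s, y)
        = PySem.Dict.mk [("Phase 1 (0-30 days)", l1 ++ [y]), ("Phase 2 (30-60 days)", l2), ("Phase 3 (60-90 days)", l3)] by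
          unfold gipStep; rw [if_pos (by omega : (s, y).1 < 5)]; rfl,
      ih (s + 1) (l1 ++ [y]) (Or.inr ⟨by omega, by omega⟩)]
    simp

-- Chunk 2: indices all in [5, 10) append to phase 2.
theorem gip_chunk2 (ys : List String) (s : Int) (l1 l2 l3 : List String)
    (h : ys = [] ∨ (5 ≤ s ∧ s + ys.length ≤ 10)) :
    (PySem.List.enumerate ys s).foldl gipStep
        (PySem.Dict.mk [("Phase 1 (0-30 days)", l1), ("Phase 2 (30-60 days)", l2), ("Phase 3 (60-90 days)", l3)]) =
      PySem.Dict.mk [("Phase 1 (0-30 days)", l1), ("Phase 2 (30-60 days)", l2 ++ ys), ("Phase 3 (60-90 days)", l3)] := by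
  induction ys generalizing s l2 with
  | nil => simp [PySem.List.enumerate_nil]
  | cons y ys ih =>
    rcases h with h | ⟨h0, hlen⟩
    · exact absurd h (by simp)
    simp only [List.length_cons] at hlen
    rw [PySem.List.enumerate_cons, List.foldl_cons,
      show gipStep (PySem.Dict.mk [("Phase 1 (0-30 days)", l1), ("Phase 2 (30-60 days)", l2), ("Phase 3 (60-90 days)", l3)]) (s, y)
        = PySem.Dict.mk [("Phase 1 (0-30 days)", l1), ("Phase 2 (30-60 days)", l2 ++ [y]), ("Phase 3 (60-90 days)", l3)] by
          unfold gipStep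
          rw [if_neg (by omega : ¬ (s, y).1 < 5), if_pos (by omega : (s, y).1 < 10)]; rfl,
      ih (s + 1) (l2 ++ [y]) (Or.inr ⟨by omega, by omega⟩)]
    simp

-- Chunk 3: indices all ≥ 10 append to phase 3.
theorem gip_chunk3 (ys : List String) (s : Int) (l1 l2 l3 : List String)
    (h : ys = [] ∨ 10 ≤ s) :
    (PySem.List.enumerate ys s).foldl gipStep
        (PySem.Dict.mk [("Phase 1 (0-30 days)", l1), ("Phase 2 (30-60 days)", l2), ("Phase 3 (60-90 days)", l3)]) =
      PySem.Dict.mk [("Phase 1 (0-30 days)", l1), ("Phase 2 (30-60 days)", l2), ("Phase 3 (60-90 days)", l3 ++ ys)] := by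
  induction ys generalizing s l3 with
  | nil => simp [PySem.List.enumerate_nil]
  | cons y ys ih =>
    rcases h with h | h0
    · exact absurd h (by simp)
    rw [PySem.List.enumerate_cons, List.foldl_cons,
      show gipStep (PySem.Dict.mk [("Phase 1 (0-30 days)", l1), ("Phase 2 (30-60 days)", l2), ("Phase 3 (60-90 days)", l3)]) (s, y)
        = PySem.Dict.mk [("Phase 1 (0-30 days)", l1), ("Phase 2 (30-60 days)", l2), ("Phase 3 (60-90 days)", l3 ++ [y])] by
          unfold gipStep
          rw [if_neg (by omega : ¬ (s, y).1 < 5), if_neg (by omega : ¬ (s, y).1 < 10)]; rfl,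
      ih (s + 1) (l3 ++ [y]) (Or.inr (by omega))]
    simp

-- ===== VERDICT (by name: the statement is the Claim_ definition above) =====
theorem generate_implementation_plan_spec : Claim_equal_generate_implementation_plan := by
  intro actions _
  unfold Spec_generate_implementation_plan generate_implementation_plan_alt
  rw [gip_eq,
    show ((15 : Int)) = ((15 : Nat) : Int) from rfl, PySem.List.slice_to_natCast,
    show ((5 : Int)) = ((5 : Nat) : Int) from rfl,
    show ((10 : Int)) = ((10 : Nat) : Int) from rfl,
    PySem.List.slice_to_natCast, PySem.List.slice_natCast, PySem.List.slice_natCast]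
  set xs := actions.take 15 with hxs
  have hsplit : xs = xs.take 5 ++ ((xs.drop 5).take 5 ++ xs.drop 10) :=
    calc xs = xs.take 5 ++ xs.drop 5 := (List.take_append_drop 5 xs).symm
      _ = xs.take 5 ++ ((xs.drop 5).take 5 ++ (xs.drop 5).drop 5) := by
          exact congrArg _ (List.take_append_drop 5 (xs.drop 5)).symm
      _ = xs.take 5 ++ ((xs.drop 5).take 5 ++ xs.drop 10) := by
          rw [List.drop_drop]
  conv_lhs => rw [hsplit]
  rw [PySem.List.enumerate_append, PySem.List.enumerate_append, List.foldl_append, List.foldl_append]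
  rw [gip_chunk1 _ _ _ _ _ (Or.inr ⟨le_refl 0, by
    simp only [List.length_take]; push_cast; omega⟩)]
  rw [gip_chunk2 _ _ _ _ _ (by
    rcases Nat.lt_or_ge xs.length 6 with hlt | hge
    · left
      refine List.eq_nil_of_length_eq_zero ?_
      simp only [List.length_take, List.length_drop]; omega
    · right
      constructor
      · simp only [List.length_take]; push_cast; omega
      · simp only [List.length_take, List.length_drop]; push_cast; omega)]
  rw [gip_chunk3 _ _ _ _ _ (by
    rcases Nat.lt_or_ge xs.length 11 with hlt | hge
    · left
      refine List.eq_nil_of_length_eq_zero ?_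
      simp only [List.length_drop]
      have : xs.length ≤ 15 := by rw [hxs]; simp
      omega
    · right
      simp only [List.length_take, List.length_drop]; push_cast; omega)]
  have e1 : xs.take 5 = actions.take 5 := by rw [hxs, List.take_take]; norm_num
  have e2 : (xs.drop 5).take 5 = (actions.drop 5).take (10 - 5) := by
    rw [hxs, List.drop_take, List.take_take]; norm_num
  have e3 : xs.drop 10 = (actions.drop 10).take (15 - 10) := by
    rw [hxs, List.drop_take]
  simp [e1, e2, e3]
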